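-- pv_equiv track=rewrite | github.com/DevilCoders/Yandex | tools/releaser/src/cli/utils.py | _get_changelog_until_version
-- ===== SOURCE A (Python) =====
-- def _get_changelog_until_version(changelog_records, prev_version, all_if_not_found=False):
--     result = []
--     for version, changelog_record in changelog_records:
--         if version == prev_version:
--             return result  # found the `upto`, return the previous collected
--         result.append((version, changelog_record))
--     if all_if_not_found:
--         return result  # return the entire source
--     return []  # `prev_version` not found, return nothing.
-- ===== SOURCE B (Python) =====
-- def _get_changelog_until_version(changelog_records, prev_version, all_if_not_found=False):
--     records = [(version, rec) for version, rec in changelog_records]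
--     versions = [v for v, _ in records]
--     if prev_version in versions:
--         return records[:versions.index(prev_version)]
--     return records if all_if_not_found else []
-- ===== Notes on version B (the rewrite author's own statement) =====
-- stated objective: alternative
-- what changed: Replaces the incremental append/early-return scan with a build-records-then-locate-index-then-slice decomposition (materialize tuples, find the first matching version's index, slice up to it).
import Mathlib
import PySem

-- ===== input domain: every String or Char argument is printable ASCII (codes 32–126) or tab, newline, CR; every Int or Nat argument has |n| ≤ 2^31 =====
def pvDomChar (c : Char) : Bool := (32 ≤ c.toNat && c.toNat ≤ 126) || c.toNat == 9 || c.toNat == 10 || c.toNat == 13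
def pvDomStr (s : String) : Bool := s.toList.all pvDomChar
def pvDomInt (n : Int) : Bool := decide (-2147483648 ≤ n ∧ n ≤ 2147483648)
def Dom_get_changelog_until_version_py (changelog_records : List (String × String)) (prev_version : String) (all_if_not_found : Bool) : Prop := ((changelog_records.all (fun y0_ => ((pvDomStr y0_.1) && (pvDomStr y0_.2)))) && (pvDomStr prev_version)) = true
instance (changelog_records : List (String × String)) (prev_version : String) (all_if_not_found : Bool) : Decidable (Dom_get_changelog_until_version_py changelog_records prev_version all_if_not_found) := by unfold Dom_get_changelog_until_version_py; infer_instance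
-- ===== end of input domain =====

-- B replaces A's incremental append/early-return scan by materialize-records, locate the first
-- matching version's index, then slice; objective: alternative decomposition (same cost).


-- ===== PORT A =====
-- A's for-loop with early return, as structural recursion over the input with the `result` accumulator
def pvLoopA (prev_version : String) (all_if_not_found : Bool) :
    List (String × String) → List (String × String) → List (String × String)
  | [], result => if all_if_not_found then result else []
  | (version, changelog_record) :: rest, result =>
      if version == prev_version then result
      else pvLoopA prev_version all_if_not_found rest (result ++ [(version, changelog_record)])

def get_changelog_until_version_py (changelog_records : List (String × String)) (prev_version : String) (all_if_not_found : Bool) : List (String × String) :=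
  pvLoopA prev_version all_if_not_found changelog_records []

-- ===== PORT B =====
def get_changelog_until_version_py_alt (changelog_records : List (String × String)) (prev_version : String) (all_if_not_found : Bool) : List (String × String) :=
  let records := changelog_records.map (fun p => (p.1, p.2))
  let versions := records.map Prod.fst
  -- `prev_version in versions` + `versions.index(prev_version)` = first-match index lookup
  match PySem.List.index? versions prev_version with
  | some idx => records.take idx          -- records[:idx], idx ≥ 0
  | none => if all_if_not_found then records else []

-- ===== PRECONDITION & SPEC =====
def Spec_get_changelog_until_version_py (changelog_records : List (String × String)) (prev_version : String) (all_if_not_found : Bool) (out : List (String × String)) : Prop := out = get_changelog_until_version_py_alt changelog_records prev_version all_if_not_found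
instance (changelog_records : List (String × String)) (prev_version : String) (all_if_not_found : Bool) (out : List (String × String)) : Decidable (Spec_get_changelog_until_version_py changelog_records prev_version all_if_not_found out) := by unfold Spec_get_changelog_until_version_py; infer_instance

-- ===== CLAIM (what is proved, stated in full; the proofs are below) =====
def Claim_equal_get_changelog_until_version_py : Prop := ∀ (changelog_records : List (String × String)) (prev_version : String) (all_if_not_found : Bool), Dom_get_changelog_until_version_py changelog_records prev_version all_if_not_found → Spec_get_changelog_until_version_py changelog_records prev_version all_if_not_found (get_changelog_until_version_py changelog_records prev_version all_if_not_found)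

-- ===== LEMMAS AND PROOFS =====
-- A's loop characterised by the index of the first match in the remaining input
theorem pvLoopA_eq_index (prev_version : String) (all_if_not_found : Bool)
    (rest acc : List (String × String)) :
    pvLoopA prev_version all_if_not_found rest acc =
      match List.idxOf? prev_version (rest.map Prod.fst) with
      | some idx => acc ++ rest.take idx
      | none => if all_if_not_found then acc ++ rest else [] := by
  induction rest generalizing acc with
  | nil => simp [pvLoopA]
  | cons hd tl ih =>
      obtain ⟨v, r⟩ := hd
      by_cases hv : v == prev_version
      · simp_all [pvLoopA, List.idxOf?_cons]
      · have h1 : pvLoopA prev_version all_if_not_found ((v, r) :: tl) acc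
            = pvLoopA prev_version all_if_not_found tl (acc ++ [(v, r)]) := by
          simp [pvLoopA, hv]
        rw [h1, ih, List.map_cons, List.idxOf?_cons, if_neg hv]
        cases h : List.idxOf? prev_version (tl.map Prod.fst) <;> simp

-- ===== VERDICT (by name: the statement is the Claim_ definition above) =====
theorem get_changelog_until_version_py_spec : Claim_equal_get_changelog_until_version_py := by
  intro changelog_records prev_version all_if_not_found _
  unfold Spec_get_changelog_until_version_py
  unfold get_changelog_until_version_py get_changelog_until_version_py_alt
  rw [pvLoopA_eq_index]
  simp [PySem.List.index?_eq_idxOf?]
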